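-- pv_equiv track=rewrite | github.com/RushabhShah20/leetcode-solutions | easy/Two Furthest Houses With Different Colors/Python/main.py | maxDistance
-- ===== SOURCE A (Python) =====
-- from typing import List
--
-- def maxDistance(colors: List[int]) -> int:
--     n: int = len(colors)
--     ans: int = 0
--     for i in range(0, n):
--         for j in range(i + 1, n):
--             if colors[i] != colors[j]:
--                 ans = max(abs(i - j), ans)
--     return ans
-- ===== SOURCE B (Python) =====
-- from typing import List
--
-- def maxDistance(colors: List[int]) -> int:
--     # One pass: the optimal pair can always be extended to touch an endpoint,
--     # so only compare each house with the first and the last house.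
--     n: int = len(colors)
--     best: int = 0
--     for i in range(0, n):
--         if colors[i] != colors[0]:
--             best = max(best, i)
--         if colors[i] != colors[n - 1]:
--             best = max(best, n - 1 - i)
--     return best
-- ===== Notes on version B (the rewrite author's own statement) =====
-- stated objective: faster
-- what changed: Replaced the all-pairs double loop with a single pass that compares each index only with the two endpoints (an optimal differing pair can always be stretched to an endpoint).
import Mathlib
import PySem

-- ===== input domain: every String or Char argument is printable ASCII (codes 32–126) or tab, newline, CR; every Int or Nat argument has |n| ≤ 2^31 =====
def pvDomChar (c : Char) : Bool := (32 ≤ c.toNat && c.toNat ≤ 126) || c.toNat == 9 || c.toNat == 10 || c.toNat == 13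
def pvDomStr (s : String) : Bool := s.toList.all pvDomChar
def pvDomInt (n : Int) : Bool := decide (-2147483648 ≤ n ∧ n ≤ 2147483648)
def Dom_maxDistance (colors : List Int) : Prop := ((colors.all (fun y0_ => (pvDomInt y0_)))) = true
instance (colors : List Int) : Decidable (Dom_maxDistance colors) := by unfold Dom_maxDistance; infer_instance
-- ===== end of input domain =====

-- B replaces A's all-pairs O(n^2) double loop by a single O(n) pass comparing each
-- index only with the two endpoints; return values are proved equal on all inputs.

-- ===== PORT A =====
def maxDistance (colors : List Int) : Int :=
  let n : Int := colors.length
  (PySem.List.pyRange 0 n 1).foldl (fun ans i =>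
    (PySem.List.pyRange (i + 1) n 1).foldl (fun ans j =>
      if PySem.List.pyGetD colors i 0 ≠ PySem.List.pyGetD colors j 0 then
        max (|i - j|) ans
      else ans) ans) 0

-- ===== PORT B =====
def maxDistance_alt (colors : List Int) : Int :=
  let n : Int := colors.length
  (PySem.List.pyRange 0 n 1).foldl (fun best i =>
    let best := if PySem.List.pyGetD colors i 0 ≠ PySem.List.pyGetD colors 0 0 then
        max best i
      else best
    if PySem.List.pyGetD colors i 0 ≠ PySem.List.pyGetD colors (n - 1) 0 then
      max best (n - 1 - i)
    else best) 0

-- ===== PRECONDITION & SPEC =====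
def Spec_maxDistance (colors : List Int) (out : Int) : Prop := out = maxDistance_alt colors
instance (colors : List Int) (out : Int) : Decidable (Spec_maxDistance colors out) := by unfold Spec_maxDistance; infer_instance

-- ===== CLAIM (what is proved, stated in full; the proofs are below) =====
def Claim_equal_maxDistance : Prop := ∀ (colors : List Int), Dom_maxDistance colors → Spec_maxDistance colors (maxDistance colors)

-- ===== LEMMAS AND PROOFS =====

-- generic facts about foldl with an accumulator-increasing step
theorem pv_foldl_ge_init (g : Int → Int → Int) (hge : ∀ a x, a ≤ g a x) :
    ∀ (L : List Int) (a : Int), a ≤ L.foldl g a := by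
  intro L
  induction L with
  | nil => intro a; simp
  | cons y L ih => intro a; exact le_trans (hge a y) (ih (g a y))

theorem pv_foldl_ge_of_mem (g : Int → Int → Int) (hge : ∀ a x, a ≤ g a x)
    (x v : Int) (hx : ∀ a, v ≤ g a x) :
    ∀ (L : List Int) (a : Int), x ∈ L → v ≤ L.foldl g a := by
  intro L
  induction L with
  | nil => intro a h; simp at h
  | cons y L ih =>
      intro a h
      rcases List.mem_cons.mp h with h | h
      · subst h
        exact le_trans (hx a) (pv_foldl_ge_init g hge L (g a x))
      · exact ih (g a y) h

theorem pv_foldl_le (g : Int → Int → Int) (c : Int) :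
    ∀ (L : List Int), (∀ a x, x ∈ L → a ≤ c → g a x ≤ c) →
      ∀ a, a ≤ c → L.foldl g a ≤ c := by
  intro L
  induction L with
  | nil => intro _ a ha; simpa using ha
  | cons y L ih =>
      intro h a ha
      exact ih (fun a x hx => h a x (List.mem_cons_of_mem y hx))
        (g a y) (h a y (List.mem_cons_self) ha)

-- abbreviations used only in the proofs
-- cV colors i = colors[i] as A and B read it
def cV (colors : List Int) (i : Int) : Int := PySem.List.pyGetD colors i 0

def stepA (colors : List Int) (i ans : Int) : Int :=
  (PySem.List.pyRange (i + 1) (colors.length : Int) 1).foldl (fun ans j =>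
    if cV colors i ≠ cV colors j then max (|i - j|) ans else ans) ans

def stepB (colors : List Int) (best i : Int) : Int :=
  let best := if cV colors i ≠ cV colors 0 then max best i else best
  if cV colors i ≠ cV colors ((colors.length : Int) - 1) then max best ((colors.length : Int) - 1 - i) else best

theorem maxDistance_eq_foldA (colors : List Int) :
    maxDistance colors = (PySem.List.pyRange 0 (colors.length : Int) 1).foldl
      (fun ans i => stepA colors i ans) 0 := rfl

theorem maxDistance_alt_eq_foldB (colors : List Int) :
    maxDistance_alt colors = (PySem.List.pyRange 0 (colors.length : Int) 1).foldl
      (stepB colors) 0 := rfl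

theorem stepA_ge (colors : List Int) : ∀ a i, a ≤ stepA colors i a := by
  intro a i
  unfold stepA
  apply pv_foldl_ge_init
  intro a j
  dsimp only
  split
  · exact le_max_right _ _
  · exact le_rfl

theorem stepB_ge (colors : List Int) : ∀ a i, a ≤ stepB colors a i := by
  intro a i
  unfold stepB
  dsimp only
  split <;> split <;> simp

-- B's result is at least i for any in-range i whose color differs from colors[0]
theorem alt_ge_left (colors : List Int) (i : Int) (h0 : 0 ≤ i) (hn : i < (colors.length : Int))
    (hne : cV colors i ≠ cV colors 0) : i ≤ maxDistance_alt colors := by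
  rw [maxDistance_alt_eq_foldB]
  apply pv_foldl_ge_of_mem (stepB colors) (stepB_ge colors) i i
  · intro a
    unfold stepB
    dsimp only
    rw [if_pos hne]
    split
    · exact le_trans (le_max_right a i) (le_max_left _ _)
    · exact le_max_right a i
  · exact (PySem.List.mem_pyRange_one).mpr ⟨h0, hn⟩

-- B's result is at least (n-1-i) for any in-range i whose color differs from colors[n-1]
theorem alt_ge_right (colors : List Int) (i : Int) (h0 : 0 ≤ i) (hn : i < (colors.length : Int))
    (hne : cV colors i ≠ cV colors ((colors.length : Int) - 1)) :
    (colors.length : Int) - 1 - i ≤ maxDistance_alt colors := by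
  rw [maxDistance_alt_eq_foldB]
  apply pv_foldl_ge_of_mem (stepB colors) (stepB_ge colors) i ((colors.length : Int) - 1 - i)
  · intro a
    unfold stepB
    dsimp only
    rw [if_pos hne]
    exact le_max_right _ _
  · exact (PySem.List.mem_pyRange_one).mpr ⟨h0, hn⟩

-- A's result is at least |i-j| for any differing in-range pair i < j
theorem a_ge_pair (colors : List Int) (i j : Int) (h0 : 0 ≤ i) (hij : i < j)
    (hn : j < (colors.length : Int)) (hne : cV colors i ≠ cV colors j) :
    |i - j| ≤ maxDistance colors := by
  rw [maxDistance_eq_foldA]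
  refine pv_foldl_ge_of_mem (fun ans i => stepA colors i ans)
    (fun a i => stepA_ge colors a i) i (|i - j|) (fun a => ?_) _ 0 ?_
  · unfold stepA
    refine pv_foldl_ge_of_mem _ (fun b x => ?_) j (|i - j|) (fun b => ?_) _ a ?_
    · dsimp only
      split
      · exact le_max_right _ _
      · exact le_rfl
    · dsimp only
      rw [if_pos hne]
      exact le_max_left _ _
    · exact (PySem.List.mem_pyRange_one).mpr ⟨by omega, hn⟩
  · exact (PySem.List.mem_pyRange_one).mpr ⟨h0, by omega⟩

theorem alt_ge_zero (colors : List Int) : 0 ≤ maxDistance_alt colors := by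
  rw [maxDistance_alt_eq_foldB]
  exact pv_foldl_ge_init _ (stepB_ge colors) _ 0

theorem a_ge_zero (colors : List Int) : 0 ≤ maxDistance colors := by
  rw [maxDistance_eq_foldA]
  exact pv_foldl_ge_init _ (fun a i => stepA_ge colors a i) _ 0

-- A ≤ B: every differing pair is dominated by an endpoint candidate of B
theorem a_le_alt (colors : List Int) : maxDistance colors ≤ maxDistance_alt colors := by
  rw [maxDistance_eq_foldA]
  apply pv_foldl_le _ _ _ _ 0 (alt_ge_zero colors)
  intro a i hi ha
  unfold stepA
  apply pv_foldl_le _ _ _ _ a ha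
  intro b j hj hb
  dsimp only
  split
  · rename_i hne
    have hi' := (PySem.List.mem_pyRange_one).mp hi
    have hj' := (PySem.List.mem_pyRange_one).mp hj
    have habs : |i - j| = j - i := by
      rw [abs_sub_comm]; exact abs_of_nonneg (by omega)
    have hval : j - i ≤ maxDistance_alt colors := by
      by_cases hjl : cV colors j = cV colors 0
      · by_cases hir : cV colors i = cV colors ((colors.length : Int) - 1)
        · -- then colors[n-1] ≠ colors[0]; the pair (0, n-1) dominates
          have hne' : cV colors ((colors.length : Int) - 1) ≠ cV colors 0 := by
            intro h; apply hne; rw [hir, hjl]; exact h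
          have := alt_ge_left colors ((colors.length : Int) - 1) (by omega) (by omega) hne'
          omega
        · have := alt_ge_right colors i (by omega) (by omega) hir
          omega
      · have := alt_ge_left colors j (by omega) (by omega) hjl
        omega
    rw [habs]
    exact max_le hval hb
  · exact hb

-- B ≤ A: every endpoint candidate of B is itself a differing pair of A
theorem alt_le_a (colors : List Int) : maxDistance_alt colors ≤ maxDistance colors := by
  rw [maxDistance_alt_eq_foldB]
  apply pv_foldl_le _ _ _ _ 0 (a_ge_zero colors)
  intro a i hi ha
  have hi' := (PySem.List.mem_pyRange_one).mp hi
  unfold stepB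
  dsimp only
  have hleft : ∀ b, b ≤ maxDistance colors →
      (if cV colors i ≠ cV colors 0 then max b i else b) ≤ maxDistance colors := by
    intro b hb
    split
    · rename_i hne
      have hi0 : 0 < i := by
        rcases lt_or_ge 0 i with h | h
        · exact h
        · exfalso; apply hne; congr 1; omega
      have := a_ge_pair colors 0 i le_rfl hi0 (by omega) (by
        intro h; exact hne h.symm)
      have habs : |0 - i| = i := by rw [abs_sub_comm]; simpa using abs_of_nonneg (le_of_lt hi0)
      rw [habs] at this
      exact max_le hb this
    · exact hb
  split
  · rename_i hne
    have hilt : i < (colors.length : Int) - 1 := by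
      rcases lt_or_ge i ((colors.length : Int) - 1) with h | h
      · exact h
      · exfalso; apply hne; congr 1; omega
    have := a_ge_pair colors i ((colors.length : Int) - 1) (by omega) hilt (by omega) hne
    have habs : |i - ((colors.length : Int) - 1)| = (colors.length : Int) - 1 - i := by
      rw [abs_sub_comm]; exact abs_of_nonneg (by omega)
    rw [habs] at this
    exact max_le (hleft a ha) this
  · exact hleft a ha

-- ===== VERDICT (by name: the statement is the Claim_ definition above) =====
theorem maxDistance_spec : Claim_equal_maxDistance := by
  intro colors _
  unfold Spec_maxDistance
  exact le_antisymm (a_le_alt colors) (alt_le_a colors)
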